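-- pv_equiv track=rewrite | github.com/krob2610/SkiTurnDetection | app/workflow/utils.py | align_min_max_lists
-- ===== SOURCE A (Python) =====
-- def align_min_max_lists(
--     new_filtered_mins,
--     new_filtered_mins_counts,
--     new_filtered_max,
--     new_filtered_maxs_counts,
-- ):
--     len_mins = len(new_filtered_mins)
--     len_maxs = len(new_filtered_max)
--
--     def trim_list_by_counts(values, counts, target_len):
--         while len(values) > target_len:
--             min_count_idx = counts.index(min(counts))
--             values.pop(min_count_idx)
--             counts.pop(min_count_idx)
--         return values, counts
--
--     if len_mins > len_maxs:
--         new_filtered_mins, new_filtered_mins_counts = trim_list_by_counts(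
--             new_filtered_mins, new_filtered_mins_counts, len_maxs + 1
--         )
--     elif len_maxs > len_mins:
--         new_filtered_max, new_filtered_maxs_counts = trim_list_by_counts(
--             new_filtered_max, new_filtered_maxs_counts, len_mins + 1
--         )
--
--     return (
--         new_filtered_mins,
--         new_filtered_mins_counts,
--         new_filtered_max,
--         new_filtered_maxs_counts,
--     )
-- ===== SOURCE B (Python) =====
-- # B: one-shot selection instead of repeated argmin-scan-and-pop: the d-th smallest
-- # count becomes a threshold, one pass over counts collects the dropped positions,
-- # and both lists are rebuilt in place (slice assignment, like A's pops).
-- # Alternative decomposition; not claimed faster.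
-- def align_min_max_lists(
--     new_filtered_mins,
--     new_filtered_mins_counts,
--     new_filtered_max,
--     new_filtered_maxs_counts,
-- ):
--     def trim(values, counts, target_len):
--         d = len(values) - target_len
--         if d <= 0:
--             return
--         t = sorted(counts)[d - 1]
--         drop_eq = d - sum(1 for c in counts if c < t)
--         dropped = set()
--         for j, c in enumerate(counts):
--             if c < t:
--                 dropped.add(j)
--             elif c == t and drop_eq > 0:
--                 drop_eq -= 1
--                 dropped.add(j)
--         values[:] = [v for j, v in enumerate(values) if j not in dropped]
--         counts[:] = [c for j, c in enumerate(counts) if j not in dropped]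
--
--     if len(new_filtered_mins) > len(new_filtered_max):
--         trim(new_filtered_mins, new_filtered_mins_counts, len(new_filtered_max) + 1)
--     elif len(new_filtered_max) > len(new_filtered_mins):
--         trim(new_filtered_max, new_filtered_maxs_counts, len(new_filtered_mins) + 1)
--
--     return (
--         new_filtered_mins,
--         new_filtered_mins_counts,
--         new_filtered_max,
--         new_filtered_maxs_counts,
--     )
-- ===== Notes on version B (the rewrite author's own statement) =====
-- stated objective: alternative
-- what changed: Replaced the repeated scan-for-minimum-and-pop loop by a one-shot selection: the d-th smallest count becomes a threshold, one pass over enumerate(counts) collects the set of dropped positions, and both lists are rebuilt in a single filtering pass.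
import Mathlib
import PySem

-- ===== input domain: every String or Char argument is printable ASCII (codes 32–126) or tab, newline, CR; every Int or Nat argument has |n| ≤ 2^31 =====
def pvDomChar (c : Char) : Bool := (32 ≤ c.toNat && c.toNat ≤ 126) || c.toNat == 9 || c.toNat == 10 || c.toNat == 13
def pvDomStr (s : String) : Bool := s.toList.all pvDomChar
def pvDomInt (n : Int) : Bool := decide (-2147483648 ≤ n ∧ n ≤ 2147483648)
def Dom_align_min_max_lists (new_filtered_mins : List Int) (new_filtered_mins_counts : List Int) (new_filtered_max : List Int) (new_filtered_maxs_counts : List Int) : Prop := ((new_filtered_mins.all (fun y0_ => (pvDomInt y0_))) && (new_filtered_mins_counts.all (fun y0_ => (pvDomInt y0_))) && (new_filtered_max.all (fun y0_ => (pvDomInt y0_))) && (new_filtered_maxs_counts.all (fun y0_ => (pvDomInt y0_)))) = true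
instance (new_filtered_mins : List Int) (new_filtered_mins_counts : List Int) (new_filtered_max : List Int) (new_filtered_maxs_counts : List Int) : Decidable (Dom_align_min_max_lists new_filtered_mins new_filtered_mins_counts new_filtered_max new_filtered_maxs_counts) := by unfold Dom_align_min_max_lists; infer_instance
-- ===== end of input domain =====

-- B replaces A's repeated scan-for-minimum-and-pop loop by a one-shot threshold selection
-- (the d-th smallest count) plus a single rebuilding pass — objective: alternative.
-- Both A and B mutate the trimmed Python lists in place; the equivalence proved here is
-- about the returned 4-tuple of lists.

-- ===== PORT A =====
-- while len(values) > target: find index of min(counts), pop it from both lists.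
-- fuel = initial values.length bounds the loop (each iteration shortens values).
def pvTrimA : Nat → List Int → List Int → Int → List Int × List Int
  | 0, values, counts, _ => (values, counts)
  | fuel+1, values, counts, target =>
    if target < (values.length : Int) then
      match PySem.List.min? counts (fun x => x) with
      | none => (values, counts)      -- Python: min([]) raises ValueError; outside Pre_
      | some m =>
        match PySem.List.index? counts m with
        | none => (values, counts)    -- unreachable: m ∈ counts
        | some i =>
          match PySem.List.pop? values (i : Int), PySem.List.pop? counts (i : Int) with
          | some vp, some cp => pvTrimA fuel vp.2 cp.2 target
          | _, _ => (values, counts)  -- Python: IndexError; outside Pre_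
    else (values, counts)

def align_min_max_lists (new_filtered_mins : List Int) (new_filtered_mins_counts : List Int) (new_filtered_max : List Int) (new_filtered_maxs_counts : List Int) : List Int × List Int × List Int × List Int :=
  let len_mins := new_filtered_mins.length
  let len_maxs := new_filtered_max.length
  if len_maxs < len_mins then
    let r := pvTrimA len_mins new_filtered_mins new_filtered_mins_counts ((len_maxs : Int) + 1)
    (r.1, r.2, new_filtered_max, new_filtered_maxs_counts)
  else if len_mins < len_maxs then
    let r := pvTrimA len_maxs new_filtered_max new_filtered_maxs_counts ((len_mins : Int) + 1)
    (new_filtered_mins, new_filtered_mins_counts, r.1, r.2)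
  else
    (new_filtered_mins, new_filtered_mins_counts, new_filtered_max, new_filtered_maxs_counts)

-- ===== PORT B =====
-- t = sorted(counts)[d-1]; one pass over enumerate(counts) collects the set of dropped
-- positions (all counts < t plus the first d-below counts == t); both lists are rebuilt
-- by filtering out those positions.
def pvTrimB (values counts : List Int) (target : Int) : List Int × List Int :=
  let d : Int := (values.length : Int) - target
  if d ≤ 0 then (values, counts)
  else
    match PySem.List.pyGet? (PySem.List.sorted counts (fun x => x) false) (d - 1) with
    | none => (values, counts)
    | some t =>
      let st := (PySem.List.enumerate counts 0).foldl
        (fun (st : Int × PySem.Set Int) jc =>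
          if jc.2 < t then (st.1, PySem.Set.add st.2 jc.1)
          else if jc.2 = t ∧ 0 < st.1 then (st.1 - 1, PySem.Set.add st.2 jc.1)
          else st)
        (d - counts.foldl (fun acc c => if c < t then acc + 1 else acc) 0, PySem.Set.empty)
      let dropped := st.2
      (((PySem.List.enumerate values 0).filter (fun jv => !(PySem.Set.contains dropped jv.1))).map Prod.snd,
       ((PySem.List.enumerate counts 0).filter (fun jc => !(PySem.Set.contains dropped jc.1))).map Prod.snd)

def align_min_max_lists_alt (new_filtered_mins : List Int) (new_filtered_mins_counts : List Int) (new_filtered_max : List Int) (new_filtered_maxs_counts : List Int) : List Int × List Int × List Int × List Int :=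
  if new_filtered_max.length < new_filtered_mins.length then
    let r := pvTrimB new_filtered_mins new_filtered_mins_counts ((new_filtered_max.length : Int) + 1)
    (r.1, r.2, new_filtered_max, new_filtered_maxs_counts)
  else if new_filtered_mins.length < new_filtered_max.length then
    let r := pvTrimB new_filtered_max new_filtered_maxs_counts ((new_filtered_mins.length : Int) + 1)
    (new_filtered_mins, new_filtered_mins_counts, r.1, r.2)
  else
    (new_filtered_mins, new_filtered_mins_counts, new_filtered_max, new_filtered_maxs_counts)

-- ===== PRECONDITION & SPEC =====
-- Pre_ requires the trimmed side's counts list to be no longer than its values list and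
-- long enough to supply every removal (the lists are parallel by the function's purpose,
-- and Pre_ admits every shorter-counts input on which the removals stay coherent).
-- Outside Pre_ the counts list does not correspond to values and A usually raises
-- (ValueError on min([]) or IndexError on values.pop); where it still returns, that
-- value is an artefact of popping by a non-parallel counts list.
def Pre_align_min_max_lists (new_filtered_mins : List Int) (new_filtered_mins_counts : List Int) (new_filtered_max : List Int) (new_filtered_maxs_counts : List Int) : Prop :=
  (new_filtered_max.length < new_filtered_mins.length →
     new_filtered_mins.length ≤ new_filtered_mins_counts.length + new_filtered_max.length + 1 ∧
     new_filtered_mins_counts.length ≤ new_filtered_mins.length) ∧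
  (new_filtered_mins.length < new_filtered_max.length →
     new_filtered_max.length ≤ new_filtered_maxs_counts.length + new_filtered_mins.length + 1 ∧
     new_filtered_maxs_counts.length ≤ new_filtered_max.length)
instance (new_filtered_mins : List Int) (new_filtered_mins_counts : List Int) (new_filtered_max : List Int) (new_filtered_maxs_counts : List Int) : Decidable (Pre_align_min_max_lists new_filtered_mins new_filtered_mins_counts new_filtered_max new_filtered_maxs_counts) := by unfold Pre_align_min_max_lists; infer_instance

def pvWitness_align_min_max_lists : List Int × List Int × List Int × List Int := ([1, 2, 3], [3, 1, 2], [7], [5])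

def Spec_align_min_max_lists (new_filtered_mins : List Int) (new_filtered_mins_counts : List Int) (new_filtered_max : List Int) (new_filtered_maxs_counts : List Int) (out : List Int × List Int × List Int × List Int) : Prop := out = align_min_max_lists_alt new_filtered_mins new_filtered_mins_counts new_filtered_max new_filtered_maxs_counts
instance (new_filtered_mins : List Int) (new_filtered_mins_counts : List Int) (new_filtered_max : List Int) (new_filtered_maxs_counts : List Int) (out : List Int × List Int × List Int × List Int) : Decidable (Spec_align_min_max_lists new_filtered_mins new_filtered_mins_counts new_filtered_max new_filtered_maxs_counts out) := by unfold Spec_align_min_max_lists; infer_instance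

-- ===== CLAIM (what is proved, stated in full; the proofs are below) =====
def Claim_equal_align_min_max_lists : Prop := ∀ (new_filtered_mins : List Int) (new_filtered_mins_counts : List Int) (new_filtered_max : List Int) (new_filtered_maxs_counts : List Int), Dom_align_min_max_lists new_filtered_mins new_filtered_mins_counts new_filtered_max new_filtered_maxs_counts → Pre_align_min_max_lists new_filtered_mins new_filtered_mins_counts new_filtered_max new_filtered_maxs_counts → Spec_align_min_max_lists new_filtered_mins new_filtered_mins_counts new_filtered_max new_filtered_maxs_counts (align_min_max_lists new_filtered_mins new_filtered_mins_counts new_filtered_max new_filtered_maxs_counts)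

-- ===== LEMMAS AND PROOFS =====

-- Proof-side models of B's pass: keepK is the kept (value,count) pairs with '== t' drop
-- budget e; dropJ is the list of dropped positions the port's Set accumulates.
def keepK (t : Int) : Int → List (Int × Int) → List (Int × Int)
  | _, [] => []
  | e, p :: ps =>
    if p.2 < t then keepK t e ps
    else if p.2 = t ∧ 0 < e then keepK t (e - 1) ps
    else p :: keepK t e ps

def dropJ (t : Int) : Int → List (Int × Int) → List Int
  | _, [] => []
  | e, p :: ps =>
    if p.2 < t then p.1 :: dropJ t e ps
    else if p.2 = t ∧ 0 < e then p.1 :: dropJ t (e - 1) ps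
    else dropJ t e ps

lemma keepK_all_ge (t : Int) (ps : List (Int × Int)) (e : Int)
    (h : ∀ p ∈ ps, ¬ p.2 < t) (he : ¬ 0 < e) : keepK t e ps = ps := by
  induction ps with
  | nil => simp [keepK]
  | cons p ps ih =>
    simp only [keepK]
    rw [if_neg (h p (by simp)), if_neg (by simp [he]), ih (fun q hq => h q (by simp [hq]))]

lemma keepK_erase_below (t : Int) : ∀ (ps : List (Int × Int)) (i : Nat) (e : Int)
    (hi : i < ps.length), ps[i].2 < t → keepK t e ps = keepK t e (ps.eraseIdx i) := by
  intro ps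
  induction ps with
  | nil => intro i e hi; simp at hi
  | cons p ps ih =>
    intro i e hi hlt
    cases i with
    | zero => simp only [List.eraseIdx_zero, List.tail_cons, keepK]; simp at hlt; rw [if_pos hlt]
    | succ j =>
      simp only [List.eraseIdx_cons_succ, keepK]
      simp only [List.getElem_cons_succ] at hlt
      have hj : j < ps.length := by simpa using hi
      split_ifs with h1 h2
      · exact ih j e hj hlt
      · exact ih j (e-1) hj hlt
      · rw [ih j e hj hlt]

lemma keepK_erase_first_eq (t : Int) : ∀ (ps : List (Int × Int)) (i : Nat) (e : Int)
    (hi : i < ps.length), (∀ p ∈ ps, t ≤ p.2) → ps[i].2 = t → (∀ j (hj : j < i), ps[j].2 ≠ t) →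
    0 < e → keepK t e ps = keepK t (e - 1) (ps.eraseIdx i) := by
  intro ps
  induction ps with
  | nil => intro i e hi; simp at hi
  | cons p ps ih =>
    intro i e hi hge heq hfirst he
    cases i with
    | zero =>
      simp only [List.getElem_cons_zero] at heq
      simp only [List.eraseIdx_zero, List.tail_cons, keepK]
      rw [if_neg (by omega), if_pos ⟨heq, he⟩]
    | succ j =>
      simp only [List.getElem_cons_succ] at heq
      have hp2 : t < p.2 := by
        have := hge p (by simp)
        have := hfirst 0 (Nat.succ_pos j)
        simp at this
        omega
      have hj : j < ps.length := by simpa using hi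
      simp only [List.eraseIdx_cons_succ, keepK]
      rw [if_neg (by omega), if_neg (by intro hc; omega), if_neg (by omega),
          if_neg (by intro hc; omega)]
      rw [ih j e hj (fun q hq => hge q (by simp [hq])) heq
          (fun k hk => hfirst (k+1) (by omega)) he]

lemma mem_dropJ (t : Int) : ∀ (ps : List (Int × Int)) (e : Int) (j : Int),
    j ∈ dropJ t e ps → ∃ p ∈ ps, j = p.1 := by
  intro ps
  induction ps with
  | nil => intro e j hj; simp [dropJ] at hj
  | cons p ps ih =>
    intro e j hj
    rw [dropJ] at hj
    split_ifs at hj with h1 h2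
    · rcases List.mem_cons.1 hj with rfl | hj'
      · exact ⟨p, by simp⟩
      · obtain ⟨q, hq, rfl⟩ := ih _ _ hj'; exact ⟨q, by simp [hq]⟩
    · rcases List.mem_cons.1 hj with rfl | hj'
      · exact ⟨p, by simp⟩
      · obtain ⟨q, hq, rfl⟩ := ih _ _ hj'; exact ⟨q, by simp [hq]⟩
    · obtain ⟨q, hq, rfl⟩ := ih _ _ hj; exact ⟨q, by simp [hq]⟩

lemma mem_dropJ_enum_ge (t : Int) : ∀ (cs : List Int) (n : Int) (e : Int) (j : Int),
    j ∈ dropJ t e (PySem.List.enumerate cs n) → n ≤ j := by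
  intro cs n e j hj
  obtain ⟨p, hp, rfl⟩ := mem_dropJ t _ e _ hj
  obtain ⟨k, hk, rfl⟩ := (PySem.List.mem_enumerate_iff _ _ _).1 hp
  simp

lemma foldl_dropJ (t : Int) : ∀ (ps : List (Int × Int)) (e : Int) (s : PySem.Set Int),
    (∀ p ∈ ps, ¬ p.1 ∈ s) → (ps.map Prod.fst).Nodup →
    (ps.foldl
      (fun (st : Int × PySem.Set Int) jc =>
        if jc.2 < t then (st.1, PySem.Set.add st.2 jc.1)
        else if jc.2 = t ∧ 0 < st.1 then (st.1 - 1, PySem.Set.add st.2 jc.1)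
        else st)
      (e, s)).2 = s ++ dropJ t e ps := by
  intro ps
  induction ps with
  | nil => intro e s _ _; simp [dropJ]
  | cons p ps ih =>
    intro e s hs hnd
    simp only [List.map_cons, List.nodup_cons] at hnd
    have hfresh : ∀ q ∈ ps, ¬ q.1 ∈ PySem.Set.add s p.1 := by
      intro q hq hmem
      rcases (PySem.Set.mem_add _ _ _).1 hmem with h | h
      · exact hs q (by simp [hq]) h
      · exact hnd.1 (h ▸ List.mem_map_of_mem hq)
    have hadd : PySem.Set.add s p.1 = s ++ [p.1] :=
      PySem.Set.add_of_not_mem (hs p (by simp))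
    simp only [List.foldl_cons, dropJ]
    split_ifs with h1 h2
    · rw [ih _ _ hfresh hnd.2, hadd]; simp
    · rw [ih _ _ hfresh hnd.2, hadd]; simp
    · rw [ih _ _ (fun q hq => hs q (by simp [hq])) hnd.2]

lemma filter_congr_shift (t : Int) (v cs : List Int) (n e : Int) :
    (PySem.List.enumerate v (n+1)).filter
      (fun jv => !(PySem.Set.contains (n :: dropJ t e (PySem.List.enumerate cs (n+1))) jv.1))
    = (PySem.List.enumerate v (n+1)).filter
      (fun jv => !(PySem.Set.contains (dropJ t e (PySem.List.enumerate cs (n+1))) jv.1)) := by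
  apply List.filter_congr
  intro jv hjv
  obtain ⟨k, hk, rfl⟩ := (PySem.List.mem_enumerate_iff _ _ _).1 hjv
  have hne : ((n + 1 + (k:Int)) == n) = false := by simp; omega
  simp only [PySem.Set.contains, List.contains_cons, hne, Bool.false_or]

lemma filter_values_eq (t : Int) : ∀ (cs v : List Int) (n e : Int),
    ((PySem.List.enumerate v n).filter
        (fun jv => !(PySem.Set.contains (dropJ t e (PySem.List.enumerate cs n)) jv.1))).map Prod.snd
    = (keepK t e (v.zip cs)).map Prod.fst ++ v.drop cs.length := by
  intro cs
  induction cs with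
  | nil =>
    intro v n e
    simp [PySem.List.enumerate_nil, dropJ, keepK, PySem.List.map_snd_enumerate]
  | cons c cs ih =>
    intro v n e
    cases v with
    | nil => simp [PySem.List.enumerate_nil, keepK]
    | cons x v =>
      rw [PySem.List.enumerate_cons, PySem.List.enumerate_cons, List.zip_cons_cons, dropJ, keepK]
      simp only []
      split_ifs with h1 h2
      · rw [List.filter_cons_of_neg (by simp [PySem.Set.contains]),
          filter_congr_shift t v cs n e, ih v (n+1) e]
        simp
      · rw [List.filter_cons_of_neg (by simp [PySem.Set.contains]),
          filter_congr_shift t v cs n (e-1), ih v (n+1) (e-1)]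
        simp
      · rw [List.filter_cons_of_pos (by simp; exact fun hmem => absurd (mem_dropJ_enum_ge t cs (n+1) e n hmem) (by omega))]
        simp only [List.map_cons, List.length_cons, List.drop_succ_cons, List.cons_append]
        rw [ih v (n+1) e]

lemma filter_counts_eq (t : Int) : ∀ (cs v : List Int) (n e : Int), cs.length ≤ v.length →
    ((PySem.List.enumerate cs n).filter
        (fun jc => !(PySem.Set.contains (dropJ t e (PySem.List.enumerate cs n)) jc.1))).map Prod.snd
    = (keepK t e (v.zip cs)).map Prod.snd := by
  intro cs
  induction cs with
  | nil =>
    intro v n e _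
    simp [PySem.List.enumerate_nil, keepK]
  | cons c cs ih =>
    intro v n e hle
    cases v with
    | nil => simp at hle
    | cons x v =>
      rw [PySem.List.enumerate_cons, List.zip_cons_cons, dropJ, keepK]
      simp only []
      split_ifs with h1 h2
      · rw [List.filter_cons_of_neg (by simp [PySem.Set.contains]),
          filter_congr_shift t cs cs n e, ih v (n+1) e (by simpa using hle)]
      · rw [List.filter_cons_of_neg (by simp [PySem.Set.contains]),
          filter_congr_shift t cs cs n (e-1), ih v (n+1) (e-1) (by simpa using hle)]
      · rw [List.filter_cons_of_pos (by simp; exact fun hmem => absurd (mem_dropJ_enum_ge t cs (n+1) e n hmem) (by omega))]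
        simp only [List.map_cons]
        rw [ih v (n+1) e (by simpa using hle)]

lemma pvTrimB_eq_keepK (v cs : List Int) (target : Int) (t : Int)
    (hle : cs.length ≤ v.length)
    (hd : ¬ ((v.length : Int) - target ≤ 0))
    (hget : PySem.List.pyGet? (PySem.List.sorted cs (fun x => x) false) ((v.length : Int) - target - 1) = some t) :
    pvTrimB v cs target =
      ((keepK t ((v.length : Int) - target - (cs.countP (fun x => x < t) : Int)) (v.zip cs)).map Prod.fst ++ v.drop cs.length,
       (keepK t ((v.length : Int) - target - (cs.countP (fun x => x < t) : Int)) (v.zip cs)).map Prod.snd) := by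
  have hnd : ((PySem.List.enumerate cs 0).map Prod.fst).Nodup :=
    (List.pairwise_map.2 (PySem.List.pairwise_lt_enumerate cs 0)).imp (fun h => Int.ne_of_lt h)
  rw [pvTrimB]
  simp only [hd, if_false, hget]
  rw [PySem.List.foldl_ite_add_one,
    foldl_dropJ t (PySem.List.enumerate cs 0) _ PySem.Set.empty (by simp [PySem.Set.empty]) hnd]
  simp only [PySem.Set.empty, List.nil_append, Int.zero_add]
  rw [filter_values_eq t cs v 0 _, filter_counts_eq t cs v 0 _ hle]

lemma map_fst_zip_take : ∀ (v cs : List Int), (v.zip cs).map Prod.fst = v.take cs.length := by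
  intro v
  induction v with
  | nil => intro cs; simp
  | cons x v ih =>
    intro cs
    cases cs with
    | nil => simp
    | cons c cs => simp [List.zip_cons_cons, ih]

lemma zip_eraseIdx : ∀ (v cs : List Int) (i : Nat), i < cs.length → cs.length ≤ v.length →
    (v.zip cs).eraseIdx i = (v.eraseIdx i).zip (cs.eraseIdx i) := by
  intro v
  induction v with
  | nil => intro cs i hi hle; simp at hle; subst hle; simp at hi
  | cons x v ih =>
    intro cs i hi hle
    cases cs with
    | nil => simp at hi
    | cons y cs =>
      cases i with
      | zero => simp
      | succ j =>
        simp only [List.zip_cons_cons, List.eraseIdx_cons_succ]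
        rw [ih cs j (by simpa using hi) (by simpa using hle)]

lemma drop_eraseIdx : ∀ (v : List Int) (i C : Nat), i < C →
    (v.eraseIdx i).drop (C - 1) = v.drop C := by
  intro v
  induction v with
  | nil => intro i C _; simp
  | cons x v ih =>
    intro i C hiC
    cases i with
    | zero =>
      simp only [List.eraseIdx_zero, List.tail_cons]
      cases C with
      | zero => omega
      | succ C' => simp
    | succ j =>
      cases C with
      | zero => omega
      | succ C' =>
        simp only [List.eraseIdx_cons_succ, Nat.add_sub_cancel]
        cases C' with
        | zero => omega
        | succ C'' =>
          rw [List.drop_succ_cons, List.drop_succ_cons, ← ih j (C''+1) (by omega)]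
          simp

lemma zip_snd_getElem (v cs : List Int) (hle : cs.length ≤ v.length) (j : Nat) (hj : j < cs.length) :
    ((v.zip cs)[j]'(by simp; omega)).2 = cs[j] := by
  simp [List.getElem_zip]

lemma trimB_step (v cs : List Int) (target : Int) (hle : cs.length ≤ v.length)
    (hdC : (v.length : Int) - target ≤ (cs.length : Int))
    (ht : 0 ≤ target) (hgt : target < (v.length : Int)) (m : Int)
    (hm : PySem.List.min? cs (fun x => x) = some m) (i : Nat)
    (hi : PySem.List.index? cs m = some i) :
    pvTrimB v cs target = pvTrimB (v.eraseIdx i) (cs.eraseIdx i) target := by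
  -- basic facts
  obtain ⟨hik, hci, hfirst⟩ := PySem.List.getElem_of_index?_eq_some hi
  have hiv : i < v.length := lt_of_lt_of_le hik hle
  have hmin : ∀ y ∈ cs, m ≤ y := PySem.List.min?_isMin hm
  have hlen_er : (v.eraseIdx i).length = v.length - 1 := List.length_eraseIdx_of_lt hiv
  have hlen_erc : (cs.eraseIdx i).length = cs.length - 1 := List.length_eraseIdx_of_lt hik
  -- the sorted list
  set s := PySem.List.sorted cs (fun x => x) false with hs
  have hslen : s.length = cs.length := PySem.List.length_sorted cs (fun x => x) false
  have hcpos : 0 < cs.length := by omega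
  obtain ⟨hd, tl, hstl⟩ : ∃ hd tl, s = hd :: tl := by
    cases hse : s with
    | nil => rw [hse] at hslen; simp at hslen; omega
    | cons a b => exact ⟨a, b, rfl⟩
  have hhd : hd = m := by
    have h1 : ∀ y ∈ cs, hd ≤ y := PySem.List.key_head_sorted_le _ _ (hs.symm.trans hstl)
    have h2 : hd ∈ cs := by
      have : hd ∈ s := by rw [hstl]; simp
      exact (PySem.List.mem_sorted _ _ _ _).1 this
    exact le_antisymm (h1 m (PySem.List.min?_mem hm)) (hmin hd h2)
  have hperm : cs.Perm (m :: cs.eraseIdx i) := by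
    have h0 := List.getElem_cons_eraseIdx_perm hik
    rw [hci] at h0
    exact h0.symm
  have htlperm : tl.Perm (cs.eraseIdx i) := by
    have h1 : (hd :: tl).Perm cs := hstl ▸ (PySem.List.sorted_perm (xs := cs) (key := fun x => x) (rev := false))
    have h2 : (hd :: tl).Perm (m :: cs.eraseIdx i) := h1.trans hperm
    rw [hhd] at h2
    exact h2.cons_inv
  have htlpw : tl.Pairwise (fun a b => a ≤ b) := by
    have := PySem.List.sorted_pairwise (xs := cs) (key := fun x => x)
    rw [← hs, hstl] at this
    exact this.of_cons
  have hsorted_er : PySem.List.sorted (cs.eraseIdx i) (fun x => x) false = tl :=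
    PySem.List.sorted_id_eq_of_perm_of_pairwise _ _ htlperm htlpw
  -- d
  set d : Int := (v.length : Int) - target with hdd
  have hd1 : 1 ≤ d := by omega
  have hdne : ¬ (d ≤ 0) := by omega
  -- zip facts
  have hzlen : (v.zip cs).length = cs.length := by simp; omega
  have hzip_snd_mem : ∀ p ∈ v.zip cs, p.2 ∈ cs := fun p hp => (List.of_mem_zip hp).2
  by_cases hd1' : d = 1
  · -- d = 1 : RHS returns the erased pair directly
    have hrhs : pvTrimB (v.eraseIdx i) (cs.eraseIdx i) target = (v.eraseIdx i, cs.eraseIdx i) := by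
      rw [pvTrimB]
      have : ((v.eraseIdx i).length : Int) - target ≤ 0 := by rw [hlen_er]; omega
      simp only [this, if_true]
    -- t = m
    have hget : PySem.List.pyGet? s (d - 1) = some m := by
      have : d - 1 = ((0 : Nat) : Int) := by omega
      rw [this, PySem.List.pyGet?_natCast, hstl]
      simp [hhd]
    have hbelow : cs.countP (fun x => x < m) = 0 := by
      rw [List.countP_eq_zero]
      intro a ha
      simpa using not_lt.2 (hmin a ha)
    rw [pvTrimB_eq_keepK v cs target m hle hdne (by rw [← hdd]; exact hget), hrhs]
    have he1 : d - (cs.countP (fun x => x < m) : Int) = 1 := by rw [hbelow]; omega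
    rw [← hdd, he1]
    have hkeep : keepK m 1 (v.zip cs) = (v.zip cs).eraseIdx i := by
      rw [keepK_erase_first_eq m (v.zip cs) i 1 (by omega)
        (fun p hp => hmin p.2 (hzip_snd_mem p hp))
        ((zip_snd_getElem v cs hle i hik).trans hci)
        (fun j hj => fun hc => hfirst j hj ((zip_snd_getElem v cs hle j (by omega)).symm.trans hc))
        one_pos]
      exact keepK_all_ge m _ 0
        (fun p hp => by simpa using hmin p.2 (hzip_snd_mem p (List.mem_of_mem_eraseIdx hp)))
        (by omega)
    rw [hkeep, zip_eraseIdx v cs i hik hle, map_fst_zip_take,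
      List.map_snd_zip (by rw [List.length_eraseIdx_of_lt hik, List.length_eraseIdx_of_lt hiv]; omega),
      hlen_erc, ← drop_eraseIdx v i cs.length hik, List.take_append_drop]
  · -- d ≥ 2
    have hd2 : 2 ≤ d := by omega
    -- t on both sides
    have hdn : ((d - 1).toNat : Int) = d - 1 := by omega
    have hdn2 : ((d - 2).toNat : Int) = d - 2 := by omega
    have hidx : (d-1).toNat < s.length := by rw [hslen]; omega
    set t := s[(d-1).toNat]'hidx with htdef
    have hget : PySem.List.pyGet? s (d - 1) = some t := by
      rw [← hdn, PySem.List.pyGet?_natCast]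
      simp [htdef]
    have htl_idx : (d-2).toNat < tl.length := by
      have : tl.length + 1 = s.length := by rw [hstl]; simp
      omega
    have htl_t : tl[(d-2).toNat]'htl_idx = t := by
      rw [htdef]
      have : (d-1).toNat = (d-2).toNat + 1 := by omega
      simp only [this, hstl, List.getElem_cons_succ]
    have hget' : PySem.List.pyGet? (PySem.List.sorted (cs.eraseIdx i) (fun x => x) false)
        (((v.eraseIdx i).length : Int) - target - 1) = some t := by
      rw [hsorted_er]
      have : ((v.eraseIdx i).length : Int) - target - 1 = ((d-2).toNat : Int) := by
        rw [hlen_er]; omega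
      rw [this, PySem.List.pyGet?_natCast, List.getElem?_eq_getElem htl_idx, htl_t]
    have hdne' : ¬ (((v.eraseIdx i).length : Int) - target ≤ 0) := by rw [hlen_er]; omega
    -- m ≤ t
    have hmt : m ≤ t := by
      have hpw : s.Pairwise (fun a b => a ≤ b) := PySem.List.sorted_pairwise (xs := cs) (key := fun x => x)
      have h0 : (0:Nat) < s.length := by omega
      have hs0 : s[0]'h0 = m := by rw [List.getElem_of_eq hstl]; simp [hhd]
      rcases Nat.eq_zero_or_pos (d-1).toNat with hz | hp
      · have ht0 : t = s[0]'h0 := by simp only [htdef, hz]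
        rw [ht0, hs0]
      · rw [← hs0]
        exact List.pairwise_iff_getElem.1 hpw 0 (d-1).toNat h0 hidx hp
    -- countP relation via perm
    have hcount : cs.countP (fun x => x < t) =
        (cs.eraseIdx i).countP (fun x => x < t) + (if m < t then 1 else 0) := by
      rw [hperm.countP_eq, List.countP_cons]
      by_cases hmt' : m < t
      · simp [hmt']
      · simp [hmt']
    have hle' : (cs.eraseIdx i).length ≤ (v.eraseIdx i).length := by
      rw [hlen_erc, hlen_er]; omega
    rw [pvTrimB_eq_keepK v cs target t hle hdne (by rw [← hdd]; exact hget),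
        pvTrimB_eq_keepK (v.eraseIdx i) (cs.eraseIdx i) target t hle' hdne' hget']
    have hlen_eq : ((v.eraseIdx i).length : Int) - target = d - 1 := by rw [hlen_er]; omega
    rw [hlen_eq, ← hdd, hlen_erc, ← drop_eraseIdx v i cs.length hik, ← zip_eraseIdx v cs i hik hle]
    rcases lt_or_eq_of_le hmt with hlt | heq
    · -- m < t : erased element is below threshold
      have he : d - 1 - ((cs.eraseIdx i).countP (fun x => x < t) : Int)
          = d - (cs.countP (fun x => x < t) : Int) := by
        rw [hcount]; simp [hlt]; push_cast; omega
      rw [he,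
          ← keepK_erase_below t (v.zip cs) i _ (by omega)
            (lt_of_eq_of_lt ((zip_snd_getElem v cs hle i hik).trans hci) hlt)]
    · -- m = t : drop budget decreases by one
      have hb0 : cs.countP (fun x => x < t) = 0 := by
        rw [List.countP_eq_zero]
        intro a ha
        simpa using not_lt.2 (heq ▸ hmin a ha)
      have hb0' : (cs.eraseIdx i).countP (fun x => x < t) = 0 := by
        rw [List.countP_eq_zero]
        intro a ha
        simpa using not_lt.2 (heq ▸ hmin a (List.mem_of_mem_eraseIdx ha))
      rw [hb0, hb0']
      have hkeep : keepK t d (v.zip cs) = keepK t (d - 1) ((v.zip cs).eraseIdx i) := by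
        rw [keepK_erase_first_eq t (v.zip cs) i d (by omega)
          (fun p hp => heq ▸ hmin p.2 (hzip_snd_mem p hp))
          (((zip_snd_getElem v cs hle i hik).trans hci).trans heq)
          (fun j hj => fun hc => hfirst j hj ((zip_snd_getElem v cs hle j (by omega)).symm.trans (hc.trans heq.symm)))
          (by omega)]
      norm_num
      rw [hkeep]
      exact ⟨rfl, rfl⟩


lemma trimA_eq_trimB : ∀ (fuel : Nat) (v cs : List Int) (target : Int),
    cs.length ≤ v.length → (v.length : Int) - target ≤ (cs.length : Int) →
    0 ≤ target → v.length ≤ fuel →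
    pvTrimA fuel v cs target = pvTrimB v cs target := by
  intro fuel
  induction fuel with
  | zero =>
    intro v cs target hle hdC ht hf
    have hv : v = [] := List.eq_nil_of_length_eq_zero (by omega)
    subst hv
    rw [pvTrimA, pvTrimB]
    rw [if_pos (show ((([]:List Int).length :Nat) : Int) - target ≤ 0 by simp; omega)]
  | succ f ih =>
    intro v cs target hle hdC ht hf
    by_cases hgt : target < (v.length : Int)
    · have hcs : cs ≠ [] := by
        intro hc; subst hc; simp at hdC hle; omega
      obtain ⟨m, hm⟩ : ∃ m, PySem.List.min? cs (fun x => x) = some m := by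
        cases hmm : PySem.List.min? cs (fun x => x) with
        | none => exact absurd ((PySem.List.min?_eq_none_iff _ _).1 hmm) hcs
        | some m => exact ⟨m, rfl⟩
      have hmem : m ∈ cs := PySem.List.min?_mem hm
      obtain ⟨i, hi⟩ : ∃ i, PySem.List.index? cs m = some i := by
        cases hii : PySem.List.index? cs m with
        | none => exact absurd ((PySem.List.index?_eq_none_iff _ _).1 hii) (fun hn => hn hmem)
        | some i => exact ⟨i, rfl⟩
      obtain ⟨hik, hci, hfirst⟩ := PySem.List.getElem_of_index?_eq_some hi
      have hiv : i < v.length := lt_of_lt_of_le hik hle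
      rw [pvTrimA]
      simp only [hgt, if_true, hm, hi, PySem.List.pop?_natCast _ _ hiv, PySem.List.pop?_natCast _ _ hik]
      rw [ih _ _ _ (by rw [List.length_eraseIdx_of_lt hiv, List.length_eraseIdx_of_lt hik]; omega)
        (by rw [List.length_eraseIdx_of_lt hiv, List.length_eraseIdx_of_lt hik]; omega)
        ht (by rw [List.length_eraseIdx_of_lt hiv]; omega)]
      exact (trimB_step v cs target hle hdC ht hgt m hm i hi).symm
    · rw [pvTrimA, pvTrimB]
      have hle2 : (v.length : Int) - target ≤ 0 := by omega
      simp [hgt, hle2]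

-- ===== VERDICT (by name: the statement is the Claim_ definition above) =====
theorem align_min_max_lists_spec : Claim_equal_align_min_max_lists := by
  intro mins minc maxs maxc _ hpre
  unfold Spec_align_min_max_lists align_min_max_lists align_min_max_lists_alt
  by_cases h1 : maxs.length < mins.length
  · simp only [h1, if_true]
    rw [trimA_eq_trimB mins.length mins minc ((maxs.length : Int) + 1)
      (hpre.1 h1).2 (by have := (hpre.1 h1).1; omega) (by positivity) le_rfl]
  · by_cases h2 : mins.length < maxs.length
    · simp only [h1, h2, if_true, if_false]
      rw [trimA_eq_trimB maxs.length maxs maxc ((mins.length : Int) + 1)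
        (hpre.2 h2).2 (by have := (hpre.2 h2).1; omega) (by positivity) le_rfl]
    · simp [h1, h2]
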